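-- pv_equiv track=rewrite | github.com/suxnju/VirtualGeth | analysis.py | check_common_slot
-- ===== SOURCE A (Python) =====
-- def check_common_slot(groupid:int,txs:'list',storage_modified:'Dict') -> 'bool':
--     commons = set()
--     for i, tx_hash in enumerate(txs):
--         if i == 0:
--             commons = commons | set(storage_modified[tx_hash]['read'] + storage_modified[tx_hash]['write'])
--         else:
--             commons = commons & set(storage_modified[tx_hash]['read'] + storage_modified[tx_hash]['write'])
--
--     return commons
-- ===== SOURCE B (Python) =====
-- def check_common_slot(groupid: int, txs: 'list', storage_modified: 'Dict') -> 'bool':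
--     # Keep only the first tx's slots that every later tx also reads or writes:
--     # a filter over the head's slots instead of a threaded union/intersection accumulator.
--     if not txs:
--         return set()
--     head = storage_modified[txs[0]]
--     rest = txs[1:]
--     return {slot for slot in head['read'] + head['write']
--             if all(slot in storage_modified[t]['read'] or slot in storage_modified[t]['write']
--                    for t in rest)}
-- ===== Notes on version B (the rewrite author's own statement) =====
-- stated objective: alternative
-- what changed: Replaces the threaded union-then-repeated-set-intersection accumulator with one set comprehension that filters the first tx's slots by membership in every later tx's read/write lists.
import Mathlib
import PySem

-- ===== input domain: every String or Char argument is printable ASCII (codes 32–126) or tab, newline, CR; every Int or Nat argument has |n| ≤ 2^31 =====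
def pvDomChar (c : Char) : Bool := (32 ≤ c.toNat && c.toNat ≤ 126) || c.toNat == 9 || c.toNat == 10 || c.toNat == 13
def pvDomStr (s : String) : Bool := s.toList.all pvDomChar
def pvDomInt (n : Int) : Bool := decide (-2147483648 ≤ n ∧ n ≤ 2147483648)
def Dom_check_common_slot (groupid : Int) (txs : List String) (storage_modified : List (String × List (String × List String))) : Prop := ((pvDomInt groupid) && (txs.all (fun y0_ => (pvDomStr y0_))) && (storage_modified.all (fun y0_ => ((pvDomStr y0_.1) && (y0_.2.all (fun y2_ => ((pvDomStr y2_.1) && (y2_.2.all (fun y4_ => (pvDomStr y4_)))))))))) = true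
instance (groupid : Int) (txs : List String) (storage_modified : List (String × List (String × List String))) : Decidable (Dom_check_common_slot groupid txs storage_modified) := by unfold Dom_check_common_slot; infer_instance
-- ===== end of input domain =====

-- B replaces A's union-then-repeated-intersection accumulator by a single set comprehension
-- filtering the first tx's slots by membership in every later tx's read/write lists;
-- equality of return values is proved under Pre_ (every tx has an entry with 'read' and 'write').

-- ===== PORT A =====
-- storage_modified[tx_hash]['read'] + storage_modified[tx_hash]['write'] (total form; Pre_ guarantees the keys exist)
def pvSlotsA (storage_modified : List (String × List (String × List String))) (tx : String) : List String :=
  let info := PySem.Dict.getD (PySem.Dict.mk storage_modified) tx []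
  PySem.Dict.getD (PySem.Dict.mk info) "read" [] ++ PySem.Dict.getD (PySem.Dict.mk info) "write" []

def check_common_slot (groupid : Int) (txs : List String) (storage_modified : List (String × List (String × List String))) : List String :=
  (PySem.List.enumerate txs).foldl
    (fun (commons : PySem.Set String) p =>
      if p.1 = 0 then
        PySem.Set.union commons (PySem.Set.ofList (pvSlotsA storage_modified p.2))
      else
        PySem.Set.inter commons (PySem.Set.ofList (pvSlotsA storage_modified p.2)))
    PySem.Set.empty

-- ===== PORT B =====
-- slot in storage_modified[t]['read'] or slot in storage_modified[t]['write'] (total form; Pre_ guarantees the keys exist)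
def pvInRW (storage_modified : List (String × List (String × List String))) (t : String) (slot : String) : Bool :=
  let info := PySem.Dict.getD (PySem.Dict.mk storage_modified) t []
  (PySem.Dict.getD (PySem.Dict.mk info) "read" []).contains slot ||
  (PySem.Dict.getD (PySem.Dict.mk info) "write" []).contains slot

def check_common_slot_alt (groupid : Int) (txs : List String) (storage_modified : List (String × List (String × List String))) : List String :=
  match txs with
  | [] => PySem.Set.empty
  | t0 :: rest =>
    let head := PySem.Dict.getD (PySem.Dict.mk storage_modified) t0 []
    PySem.Set.ofList
      ((PySem.Dict.getD (PySem.Dict.mk head) "read" [] ++ PySem.Dict.getD (PySem.Dict.mk head) "write" []).filter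
        (fun slot => rest.all (fun t => pvInRW storage_modified t slot)))

-- ===== PRECONDITION & SPEC =====
-- Pre_ excludes exactly the inputs where A raises KeyError: some tx in txs is missing from
-- storage_modified, or its entry lacks the 'read' or 'write' key.
def Pre_check_common_slot (groupid : Int) (txs : List String) (storage_modified : List (String × List (String × List String))) : Prop :=
  (txs.all (fun tx =>
    (PySem.Dict.mk storage_modified).contains tx &&
    (PySem.Dict.mk (PySem.Dict.getD (PySem.Dict.mk storage_modified) tx [])).contains "read" &&
    (PySem.Dict.mk (PySem.Dict.getD (PySem.Dict.mk storage_modified) tx [])).contains "write")) = true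
instance (groupid : Int) (txs : List String) (storage_modified : List (String × List (String × List String))) : Decidable (Pre_check_common_slot groupid txs storage_modified) := by unfold Pre_check_common_slot; infer_instance

def pvWitness_check_common_slot : Int × List String × (List (String × List (String × List String))) :=
  (1, ["t1", "t2"], [("t1", [("read", ["a", "b"]), ("write", ["c"])]), ("t2", [("read", ["b"]), ("write", ["a", "b"])])])

def Spec_check_common_slot (groupid : Int) (txs : List String) (storage_modified : List (String × List (String × List String))) (out : List String) : Prop := out = check_common_slot_alt groupid txs storage_modified
instance (groupid : Int) (txs : List String) (storage_modified : List (String × List (String × List String))) (out : List String) : Decidable (Spec_check_common_slot groupid txs storage_modified out) := by unfold Spec_check_common_slot; infer_instance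

-- ===== CLAIM (what is proved, stated in full; the proofs are below) =====
def Claim_equal_check_common_slot : Prop := ∀ (groupid : Int) (txs : List String) (storage_modified : List (String × List (String × List String))), Dom_check_common_slot groupid txs storage_modified → Pre_check_common_slot groupid txs storage_modified → Spec_check_common_slot groupid txs storage_modified (check_common_slot groupid txs storage_modified)

-- ===== LEMMAS AND PROOFS =====

-- B's membership test agrees with membership in A's concatenated slot list.
theorem pvInRW_eq (sm : List (String × List (String × List String))) (t x : String) :
    pvInRW sm t x = (PySem.Set.ofList (pvSlotsA sm t)).contains x := by
  simp [pvInRW, pvSlotsA, PySem.Set.mem_ofList]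

-- A's tail loop (indices >= 1) is an intersection fold, i.e. a filter by membership in every tx's slots.
theorem pvA_tail (sm : List (String × List (String × List String))) (rest : List String) (s : Int) (hs : 1 <= s) (c : PySem.Set String) :
    (PySem.List.enumerate rest s).foldl
      (fun (commons : PySem.Set String) p =>
        if p.1 = 0 then
          PySem.Set.union commons (PySem.Set.ofList (pvSlotsA sm p.2))
        else
          PySem.Set.inter commons (PySem.Set.ofList (pvSlotsA sm p.2))) c
    = c.filter (fun x => rest.all (fun t => pvInRW sm t x)) := by
  induction rest generalizing s c with
  | nil => simp [PySem.List.enumerate_nil]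
  | cons t rest ih =>
    rw [PySem.List.enumerate_cons]
    simp only [List.foldl_cons]
    rw [if_neg (by omega)]
    rw [ih (s + 1) (by omega)]
    simp only [PySem.Set.inter, List.filter_filter, List.all_cons, pvInRW_eq]
    apply List.filter_congr
    intro x _
    simp [Bool.and_comm]

-- set(comprehension with a filter) builds the same list as filtering the deduplicated list.
theorem pvOfList_filter (l : List String) (p : String → Bool) :
    PySem.Set.ofList (l.filter p) = (PySem.Set.ofList l).filter p := by
  induction l with
  | nil => rfl
  | cons x xs ih =>
    by_cases hp : p x
    · simp [hp, PySem.Set.ofList_cons, ih, PySem.Set.discard, List.filter_filter]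
      apply List.filter_congr; intro a _; simp [Bool.and_comm]
    · simp [hp, PySem.Set.ofList_cons, ih, PySem.Set.discard, List.filter_filter]
      apply List.filter_congr; intro a ha
      rcases eq_or_ne a x with rfl | h
      · simp [hp]
      · simp [h]

-- ===== VERDICT (by name: the statement is the Claim_ definition above) =====
theorem check_common_slot_spec : Claim_equal_check_common_slot := by
  intro groupid txs sm _ _
  unfold Spec_check_common_slot
  cases txs with
  | nil => rfl
  | cons t0 rest =>
    -- A's side: union with the first tx's slots, then a filter by membership in every later tx's slots
    have hA : check_common_slot groupid (t0 :: rest) sm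
        = (PySem.Set.ofList (pvSlotsA sm t0)).filter (fun x => rest.all (fun t => pvInRW sm t x)) := by
      unfold check_common_slot
      rw [PySem.List.enumerate_cons]
      simp only [List.foldl_cons, if_true]
      rw [pvA_tail sm rest (0 + 1) (by omega)]
      congr 1
      show PySem.Set.update ([] : PySem.Set String) (PySem.Set.ofList (pvSlotsA sm t0)) = _
      rw [PySem.Set.update_nil_left, PySem.Set.ofList_ofList]
    -- B's side: the comprehension's filtered list, deduplicated
    have hB : check_common_slot_alt groupid (t0 :: rest) sm
        = PySem.Set.ofList ((pvSlotsA sm t0).filter (fun x => rest.all (fun t => pvInRW sm t x))) := rfl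
    rw [hA, hB, pvOfList_filter]
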